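-- pv_equiv track=rewrite | github.com/Marceloalf/Uri-debug | question/lista/q2162.py | verify_hills
-- ===== SOURCE A (Python) =====
-- def verify(a, b, c):
--     return a < b > c or a > b < c
--
-- def verify_hills(hills, n):
--     verification = 1
--
--     if n == 2 and hills[0] == hills[1]:
--         verification = 0
--
--     for i in range(1, n-1):
--         if verify(hills[i-1], hills[i], hills[i+1]):
--             continue
--         else:
--             verification = 0
--
--     return verification
-- ===== SOURCE B (Python) =====
-- def verify_hills(hills, n):
--     # Build comparison signs over the n-1 adjacent pairs, then check the zigzag in one scan.
--     signs = [(hills[i] > hills[i - 1]) - (hills[i] < hills[i - 1]) for i in range(1, n)]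
--     if any(s == 0 for s in signs):
--         return 0
--     if any(s == t for s, t in zip(signs, signs[1:])):
--         return 0
--     return 1
-- ===== Notes on version B (the rewrite author's own statement) =====
-- stated objective: alternative
-- what changed: Instead of A's single flag-carrying loop over index triples calling verify(a,b,c), B first materialises the list of comparison signs of adjacent pairs and then decides the answer in two scans: any zero sign, or any two equal consecutive signs, yields 0.
import Mathlib
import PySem

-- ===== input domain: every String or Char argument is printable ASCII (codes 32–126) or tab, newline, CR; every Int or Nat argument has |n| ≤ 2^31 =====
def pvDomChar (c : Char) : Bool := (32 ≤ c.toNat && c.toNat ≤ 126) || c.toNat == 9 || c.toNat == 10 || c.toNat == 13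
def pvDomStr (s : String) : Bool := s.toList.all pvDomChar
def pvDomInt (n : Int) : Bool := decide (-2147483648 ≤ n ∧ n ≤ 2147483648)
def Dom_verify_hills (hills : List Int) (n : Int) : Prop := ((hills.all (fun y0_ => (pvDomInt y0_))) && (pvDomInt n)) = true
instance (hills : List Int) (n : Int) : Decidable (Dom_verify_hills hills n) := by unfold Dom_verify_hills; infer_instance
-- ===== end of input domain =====

-- B replaces A's flag-carrying triple loop by a sign list over adjacent pairs plus two scans (alternative decomposition, same cost).


-- ===== PORT A =====
-- helper: Python's `a < b > c or a > b < c`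
def pyVerify (a b c : Int) : Bool := (decide (a < b) && decide (c < b)) || (decide (b < a) && decide (b < c))

def verify_hills (hills : List Int) (n : Int) : Int :=
  let verification : Int :=
    if n = 2 ∧ PySem.List.pyGetD hills 0 0 = PySem.List.pyGetD hills 1 0 then 0 else 1
  (PySem.List.pyRange 1 (n - 1) 1).foldl
    (fun v i =>
      if pyVerify (PySem.List.pyGetD hills (i - 1) 0) (PySem.List.pyGetD hills i 0)
          (PySem.List.pyGetD hills (i + 1) 0) then v else 0)
    verification

-- ===== PORT B =====
def verify_hills_alt (hills : List Int) (n : Int) : Int :=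
  let signs : List Int := (PySem.List.pyRange 1 n 1).map (fun i =>
    (if PySem.List.pyGetD hills (i - 1) 0 < PySem.List.pyGetD hills i 0 then (1 : Int) else 0)
    - (if PySem.List.pyGetD hills i 0 < PySem.List.pyGetD hills (i - 1) 0 then (1 : Int) else 0))
  if signs.any (fun s => s == 0) then 0
  else if (signs.zip (signs.drop 1)).any (fun p => p.1 == p.2) then 0
  else 1

-- ===== PRECONDITION & SPEC =====
-- Pre_ excludes exactly the inputs on which Python A raises IndexError: n = 2 with fewer than
-- two hills, or n ≥ 3 with fewer than n hills (the loop reads hills[0..n-1]).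
def Pre_verify_hills (hills : List Int) (n : Int) : Prop :=
  (n = 2 → 2 ≤ hills.length) ∧ (3 ≤ n → n ≤ (hills.length : Int))
instance (hills : List Int) (n : Int) : Decidable (Pre_verify_hills hills n) := by
  unfold Pre_verify_hills; infer_instance

def pvWitness_verify_hills : List Int × Int := ([1, 3, 2], 3)

def Spec_verify_hills (hills : List Int) (n : Int) (out : Int) : Prop := out = verify_hills_alt hills n
instance (hills : List Int) (n : Int) (out : Int) : Decidable (Spec_verify_hills hills n out) := by
  unfold Spec_verify_hills; infer_instance

-- ===== CLAIM (what is proved, stated in full; the proofs are below) =====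
def Claim_equal_verify_hills : Prop := ∀ (hills : List Int) (n : Int), Dom_verify_hills hills n → Pre_verify_hills hills n → Spec_verify_hills hills n (verify_hills hills n)

-- ===== LEMMAS AND PROOFS =====

def pvSg (x y : Int) : Int := (if x < y then 1 else 0) - (if y < x then 1 else 0)

-- the adjacent-pair comparison sign at Nat position k (pair hills[k], hills[k+1])
def pvSgn (hills : List Int) (k : Nat) : Int :=
  pvSg (PySem.List.pyGetD hills (k : Int) 0) (PySem.List.pyGetD hills ((k : Int) + 1) 0)

lemma pvVerify_sg (a b c : Int) :
    pyVerify a b c = true ↔ pvSg a b ≠ 0 ∧ pvSg b c ≠ 0 ∧ pvSg a b ≠ pvSg b c := by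
  simp only [pyVerify, pvSg, Bool.or_eq_true, Bool.and_eq_true, decide_eq_true_eq]
  split_ifs <;> simp <;> omega

lemma pvVerify_iff (hills : List Int) (k : Nat) :
    pyVerify (PySem.List.pyGetD hills (k : Int) 0) (PySem.List.pyGetD hills ((k : Int) + 1) 0)
      (PySem.List.pyGetD hills ((k : Int) + 2) 0) = true
    ↔ pvSgn hills k ≠ 0 ∧ pvSgn hills (k + 1) ≠ 0 ∧ pvSgn hills k ≠ pvSgn hills (k + 1) := by
  have h1 : ((k + 1 : Nat) : Int) = (k : Int) + 1 := by push_cast; ring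
  have h2 : ((k + 1 : Nat) : Int) + 1 = (k : Int) + 2 := by push_cast; ring
  rw [pvSgn, pvSgn, h2, h1]
  exact pvVerify_sg _ _ _

-- flag loop: foldl with a kill-to-zero flag is an `all`
lemma pvFoldl_flag {α : Type} (p : α → Bool) (l : List α) (init : Int) :
    l.foldl (fun v x => if p x then v else 0) init = if l.all p then init else 0 := by
  induction l generalizing init with
  | nil => simp
  | cons a l ih =>
    simp only [List.foldl_cons, List.all_cons]
    by_cases h : p a
    · simp [h, ih init]
    · simp [h, ih 0]

lemma pvZip_drop_map_range {α : Type} (f : Nat → α) (N : Nat) :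
    (((List.range N).map f).zip (((List.range N).map f).drop 1))
      = (List.range (N - 1)).map (fun k => (f k, f (k + 1))) := by
  apply List.ext_getElem
  · simp
  · intro i h1 h2
    simp at h1 h2 ⊢

-- the combinatorial core: for M ≥ 1 triples [0, M) are all OK iff all of the M+1 signs are
-- nonzero and no two consecutive signs are equal
lemma pvKey (hills : List Int) (M : Nat) (hM : 1 ≤ M) :
    (∀ k < M, pvSgn hills k ≠ 0 ∧ pvSgn hills (k + 1) ≠ 0 ∧ pvSgn hills k ≠ pvSgn hills (k + 1))
    ↔ (∀ j < M + 1, pvSgn hills j ≠ 0) ∧ (∀ k < M, pvSgn hills k ≠ pvSgn hills (k + 1)) := by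
  constructor
  · intro h
    refine ⟨?_, fun k hk => (h k hk).2.2⟩
    intro j hj
    by_cases hjM : j < M
    · exact (h j hjM).1
    · have hjM' : j = M := by omega
      have := h (j - 1) (by omega)
      have hs : j - 1 + 1 = M := by omega
      rw [hs] at this
      rw [hjM']
      exact this.2.1
  · rintro ⟨h0, hne⟩ k hk
    exact ⟨h0 k (by omega), h0 (k + 1) (by omega), hne k hk⟩

lemma pvSg_eq_zero_iff (a b : Int) : pvSg a b = 0 ↔ a = b := by
  simp only [pvSg]; split_ifs <;> omega

lemma pvA_char (hills : List Int) (n : Int) :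
    verify_hills hills n =
      if ∀ k < (n - 2).toNat,
          pvSgn hills k ≠ 0 ∧ pvSgn hills (k + 1) ≠ 0 ∧ pvSgn hills k ≠ pvSgn hills (k + 1)
      then (if n = 2 ∧ PySem.List.pyGetD hills 0 0 = PySem.List.pyGetD hills 1 0 then 0 else 1)
      else 0 := by
  unfold verify_hills
  rw [PySem.List.pyRange_one, List.foldl_map, pvFoldl_flag]
  have hn : n - 1 - 1 = n - 2 := by ring
  rw [hn]
  refine if_congr ?_ rfl rfl
  simp only [List.all_eq_true, List.mem_range]
  constructor
  · intro h k hk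
    have := h k hk
    simp only [show (k : Int) + 1 - 1 = (k : Int) from by ring,
        show (1 : Int) + (k : Int) = (k : Int) + 1 from by ring,
        show (k : Int) + 1 + 1 = (k : Int) + 2 from by ring] at this
    exact (pvVerify_iff hills k).1 this
  · intro h k hk
    simp only [show (k : Int) + 1 - 1 = (k : Int) from by ring,
        show (1 : Int) + (k : Int) = (k : Int) + 1 from by ring,
        show (k : Int) + 1 + 1 = (k : Int) + 2 from by ring]
    exact (pvVerify_iff hills k).2 (h k hk)

lemma pvB_char (hills : List Int) (n : Int) :
    verify_hills_alt hills n =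
      if ∃ j < (n - 1).toNat, pvSgn hills j = 0 then 0
      else if ∃ k < (n - 1).toNat - 1, pvSgn hills k = pvSgn hills (k + 1) then 0
      else 1 := by
  unfold verify_hills_alt
  rw [PySem.List.pyRange_one, List.map_map]
  have hg : ((fun i : Int =>
      (if PySem.List.pyGetD hills (i - 1) 0 < PySem.List.pyGetD hills i 0 then (1 : Int) else 0)
      - (if PySem.List.pyGetD hills i 0 < PySem.List.pyGetD hills (i - 1) 0 then (1 : Int) else 0))
      ∘ (fun k : Nat => 1 + (k : Int))) = fun k : Nat => pvSgn hills k := by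
    funext k
    simp only [Function.comp, pvSgn, pvSg]
    simp only [show (k : Int) + 1 - 1 = (k : Int) from by ring,
        show (1 : Int) + (k : Int) = (k : Int) + 1 from by ring]
  rw [hg]
  simp only [pvZip_drop_map_range]
  simp only [List.any_map, List.any_eq_true, List.mem_range, Function.comp, beq_iff_eq]

theorem verify_hills_equal (hills : List Int) (n : Int) : verify_hills hills n = verify_hills_alt hills n := by
  rw [pvA_char, pvB_char]
  by_cases h2 : n = 2
  · subst h2
    simp only [show ((2 : Int) - 2).toNat = 0 from rfl, show ((2 : Int) - 1).toNat = 1 from rfl]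
    have h0 : pvSgn hills 0 = 0 ↔ PySem.List.pyGetD hills 0 0 = PySem.List.pyGetD hills 1 0 := by
      rw [pvSgn, pvSg_eq_zero_iff]
      norm_num
    by_cases he : PySem.List.pyGetD hills 0 0 = PySem.List.pyGetD hills 1 0 <;>
      simp [h0, he]
  · by_cases h3 : 3 ≤ n
    · have hM : 1 ≤ (n - 2).toNat := by omega
      have hN : (n - 1).toNat = (n - 2).toNat + 1 := by omega
      rw [hN]
      simp only [pvKey hills _ hM, Nat.lt_succ_iff]
      simp only [h2, false_and, if_false, Nat.add_sub_cancel]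
      by_cases hz : ∃ j ≤ (n - 2).toNat, pvSgn hills j = 0
      · rw [if_pos hz, if_neg]
        rintro ⟨hall, -⟩
        rcases hz with ⟨j, hj, hjz⟩
        exact hall j hj hjz
      · by_cases heq : ∃ k < (n - 2).toNat, pvSgn hills k = pvSgn hills (k + 1)
        · rw [if_neg hz, if_pos heq, if_neg]
          rintro ⟨-, hne⟩
          rcases heq with ⟨k, hk, hkeq⟩
          exact hne k hk hkeq
        · rw [if_neg hz, if_neg heq, if_pos]
          exact ⟨fun j hj hjz => hz ⟨j, hj, hjz⟩, fun k hk hkeq => heq ⟨k, hk, hkeq⟩⟩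
    · have hM0 : (n - 2).toNat = 0 := by omega
      have hN0 : (n - 1).toNat = 0 := by omega
      simp [hM0, hN0, h2]

-- ===== VERDICT (by name: the statement is the Claim_ definition above) =====
theorem verify_hills_spec : Claim_equal_verify_hills := by
  intro hills n _ _
  exact verify_hills_equal hills n
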